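-- pv_equiv track=rewrite | github.com/Sumedha494/DSA-Questions | longest_consecutive_sequence.py | findAllSequences
-- ===== SOURCE A (Python) =====
-- def findAllSequences(nums):
--     """
--     Find all consecutive sequences
--     """
--     if not nums:
--         return []
--
--     num_set = set(nums)
--     sequences = []
--
--     for num in sorted(num_set):
--         if num - 1 not in num_set:
--             current = num
--             sequence = [num]
--
--             while current + 1 in num_set:
--                 current += 1
--                 sequence.append(current)
--
--             sequences.append(sequence)
--
--     return sequences
-- ===== SOURCE B (Python) =====
-- def findAllSequences(nums):
--     if not nums:
--         return []
--     s = sorted(set(nums))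
--     runs = []
--     run = [s[0]]
--     for v in s[1:]:
--         if v == run[-1] + 1:
--             run.append(v)
--         else:
--             runs.append(run)
--             run = [v]
--     runs.append(run)
--     return runs
-- ===== Notes on version B (the rewrite author's own statement) =====
-- stated objective: simpler
-- what changed: Replaced the set-membership run-start detection with inner while-extension by a single flat adjacency scan over the sorted unique values that accumulates the current run and flushes it at each gap.
import Mathlib
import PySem

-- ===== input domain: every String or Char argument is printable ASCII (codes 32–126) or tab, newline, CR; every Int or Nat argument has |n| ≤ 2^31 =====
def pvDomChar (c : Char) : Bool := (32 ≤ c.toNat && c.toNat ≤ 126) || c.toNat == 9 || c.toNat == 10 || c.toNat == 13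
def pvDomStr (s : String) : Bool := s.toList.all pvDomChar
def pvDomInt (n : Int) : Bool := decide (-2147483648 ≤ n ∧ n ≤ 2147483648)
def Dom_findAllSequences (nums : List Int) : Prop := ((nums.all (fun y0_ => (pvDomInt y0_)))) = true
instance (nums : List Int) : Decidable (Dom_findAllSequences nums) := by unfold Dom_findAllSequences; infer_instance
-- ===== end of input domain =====

-- B replaces A's set-membership run-start detection + inner while-extension by a single
-- adjacency scan over the sorted unique values (objective: simpler).


-- ===== PORT A =====
-- 'while current + 1 in num_set' : fuel-bounded loop; fuel numSet.length suffices since each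
-- iteration moves to a strictly larger element of the finite set.
def whileExtend (numSet : List Int) : Nat → Int → List Int → List Int
  | 0, _, sequence => sequence
  | fuel + 1, current, sequence =>
    if numSet.contains (current + 1) then
      whileExtend numSet fuel (current + 1) (sequence ++ [current + 1])
    else sequence

def findAllSequences (nums : List Int) : List (List Int) :=
  if nums = [] then []
  else
    let numSet : PySem.Set Int := PySem.Set.ofList nums
    (PySem.List.sorted numSet (fun x => x) false).foldl
      (fun sequences num =>
        if numSet.contains (num - 1) then sequences
        else sequences ++ [whileExtend numSet numSet.length num [num]])
      []

-- ===== PORT B =====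
-- loop body of B: flush the current run at a gap, otherwise extend it
def bStep (st : List (List Int) × List Int) (v : Int) : List (List Int) × List Int :=
  if v = PySem.List.pyGetD st.2 (-1) 0 + 1 then (st.1, st.2 ++ [v])
  else (st.1 ++ [st.2], [v])

def findAllSequences_alt (nums : List Int) : List (List Int) :=
  if nums = [] then []
  else
    let s := PySem.List.sorted (PySem.Set.ofList nums) (fun x => x) false
    let st := (PySem.List.slice s (some 1) none).foldl bStep ([], [PySem.List.pyGetD s 0 0])
    st.1 ++ [st.2]

-- ===== PRECONDITION & SPEC =====
def Spec_findAllSequences (nums : List Int) (out : List (List Int)) : Prop := out = findAllSequences_alt nums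
instance (nums : List Int) (out : List (List Int)) : Decidable (Spec_findAllSequences nums out) := by unfold Spec_findAllSequences; infer_instance

-- ===== CLAIM (what is proved, stated in full; the proofs are below) =====
def Claim_equal_findAllSequences : Prop := ∀ (nums : List Int), Dom_findAllSequences nums → Spec_findAllSequences nums (findAllSequences nums)

-- ===== LEMMAS AND PROOFS =====

/-- Split off the maximal consecutive run following `a`. -/
def takeRun : Int → List Int → List Int × List Int
  | _, [] => ([], [])
  | a, b :: t => if b = a + 1 then ((takeRun b t).1.cons b, (takeRun b t).2) else ([], b :: t)

theorem takeRun_append (a : Int) (t : List Int) : (takeRun a t).1 ++ (takeRun a t).2 = t := by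
  induction t generalizing a with
  | nil => simp [takeRun]
  | cons b t ih => by_cases h : b = a + 1 <;> simp [takeRun, h, ih]

theorem takeRun_snd_length (a : Int) (t : List Int) : (takeRun a t).2.length ≤ t.length := by
  induction t generalizing a with
  | nil => simp [takeRun]
  | cons b t ih =>
    by_cases h : b = a + 1
    · subst h; simp only [takeRun]
      exact Nat.le_succ_of_le (ih (a + 1))
    · simp [takeRun, h]

/-- canonical run decomposition of a sorted list -/
def runsOf : List Int → List (List Int)
  | [] => []
  | a :: t => (a :: (takeRun a t).1) :: runsOf (takeRun a t).2
termination_by s => s.length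
decreasing_by
  exact Nat.lt_succ_of_le (takeRun_snd_length a t)

/-- `Consec a r` : r = [a+1, a+2, …] -/
def Consec : Int → List Int → Prop
  | _, [] => True
  | a, b :: t => b = a + 1 ∧ Consec b t

theorem takeRun_consec (a : Int) (t : List Int) : Consec a (takeRun a t).1 := by
  induction t generalizing a with
  | nil => simp [takeRun, Consec]
  | cons b t ih =>
    by_cases h : b = a + 1
    · subst h; simp only [takeRun]
      exact ⟨rfl, ih (a + 1)⟩
    · simp [takeRun, h, Consec]

theorem takeRun_gap (a : Int) (t : List Int) :
    ∀ x xs, (takeRun a t).2 = x :: xs → x ≠ a + (takeRun a t).1.length + 1 := by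
  induction t generalizing a with
  | nil => simp [takeRun]
  | cons b t ih =>
    intro x xs hx
    by_cases h : b = a + 1
    · subst h
      simp only [takeRun] at hx ⊢
      have := ih (a + 1) x xs hx
      intro hc; apply this
      push_cast at hc ⊢
      simp only [List.length_cons] at hc
      push_cast at hc; omega
    · simp only [takeRun, if_neg h] at hx ⊢
      cases hx; simpa using h

theorem consec_getElem (a : Int) (r : List Int) (hc : Consec a r) :
    ∀ (j : Nat) (h : j < r.length), r[j] = a + 1 + (j : Int) := by
  induction r generalizing a with
  | nil => intro j h; simp at h
  | cons b r ih =>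
    intro j h
    obtain ⟨hb, hcr⟩ := hc
    cases j with
    | zero => simpa using hb
    | succ j =>
      have := ih b hcr j (by simpa using h)
      simp only [List.getElem_cons_succ, this, hb]
      push_cast; ring

theorem consec_mem (a : Int) (r : List Int) (hc : Consec a r) :
    ∀ x ∈ r, a < x ∧ x ≤ a + r.length := by
  intro x hx
  obtain ⟨j, hj, rfl⟩ := List.getElem_of_mem hx
  rw [consec_getElem a r hc j hj]
  have hji : (j : Int) < r.length := by exact_mod_cast hj
  constructor <;> omega

theorem consec_pred (a : Int) (r : List Int) (hc : Consec a r) :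
    ∀ x ∈ r, x - 1 ∈ a :: r := by
  induction r generalizing a with
  | nil => simp
  | cons b r ih =>
    intro x hx
    obtain ⟨hb, hcr⟩ := hc
    rcases List.mem_cons.1 hx with rfl | hx
    · simp [hb]
    · have := ih b hcr x hx
      rcases List.mem_cons.1 this with h | h <;> simp [h]

-- c not in u when c is above the pre ++ a :: r prefix and below every element of rest
theorem notin_of_between (pre r rest : List Int) (a c : Int)
    (hu : (pre ++ a :: (r ++ rest)).Pairwise (· < ·))
    (hc : Consec a r)
    (h1 : a + r.length < c)
    (h2 : ∀ x xs, rest = x :: xs → c < x) :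
    c ∉ pre ++ a :: (r ++ rest) := by
  intro hmem
  rw [List.pairwise_append] at hu
  obtain ⟨hpre, hrest, hcross⟩ := hu
  rw [List.pairwise_cons] at hrest
  obtain ⟨halt, hrr⟩ := hrest
  rcases List.mem_append.1 hmem with h | h
  · have := hcross c h a (by simp)
    omega
  · rcases List.mem_cons.1 h with rfl | h
    · omega
    · rcases List.mem_append.1 h with h | h
      · have := (consec_mem a r hc c h).2; omega
      · cases rest with
        | nil => simp at h
        | cons x xs =>
          have hx := h2 x xs rfl
          rcases List.mem_cons.1 h with rfl | h
          · omega
          · rw [List.pairwise_append] at hrr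
            have := (List.pairwise_cons.1 hrr.2.1).1 c h
            omega

-- membership of a+1+j in u, for j up to the run length
theorem hin_of (pre r rest : List Int) (a : Int)
    (hu : (pre ++ a :: (r ++ rest)).Pairwise (· < ·))
    (hc : Consec a r)
    (hgap : ∀ x xs, rest = x :: xs → x ≠ a + r.length + 1) :
    ∀ j : Nat, j ≤ r.length → ((a + 1 + (j : Int)) ∈ pre ++ a :: (r ++ rest) ↔ j < r.length) := by
  intro j hj
  rcases Nat.lt_or_ge j r.length with h | h
  · simp only [h, iff_true]
    have : r[j] = a + 1 + (j : Int) := consec_getElem a r hc j h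
    have : a + 1 + (j : Int) ∈ r := this ▸ List.getElem_mem h
    simp [this]
  · have hje : j = r.length := le_antisymm hj h
    subst hje
    simp only [lt_irrefl, iff_false]
    apply notin_of_between pre r rest a _ hu hc (by omega)
    intro x xs hx
    have h1 := hgap x xs hx
    -- x > a + r.length from pairwise
    rw [List.pairwise_append] at hu
    have hrr := List.pairwise_cons.1 hu.2.1
    have hax : a < x := hrr.1 x (by simp [hx])
    have : ∀ y ∈ r, y < x := by
      intro y hy
      rw [hx, List.pairwise_append] at hrr
      exact hrr.2.2.2 y hy x (by simp)
    have : x > a + r.length := by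
      cases r with
      | nil => simpa using hax
      | cons b rr =>
        have hmem : a + (b :: rr).length ∈ (b :: rr) := by
          have hlt : (b :: rr).length - 1 < (b :: rr).length := by simp
          have := consec_getElem a _ hc ((b :: rr).length - 1) hlt
          have hcast : a + 1 + (((b :: rr).length - 1 : Nat) : Int) = a + (b :: rr).length := by
            simp; omega
          rw [hcast] at this
          exact this ▸ List.getElem_mem hlt
        exact (by have := ‹∀ y ∈ (b :: rr), y < x› _ hmem; omega)
    omega

-- the while loop collects exactly the consecutive run
theorem whileExtend_run (u : List Int) (r : List Int) :
    ∀ (a : Int) (seq : List Int) (fuel : Nat), Consec a r → r.length ≤ fuel →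
    (∀ j : Nat, j ≤ r.length → ((a + 1 + (j : Int)) ∈ u ↔ j < r.length)) →
    whileExtend u fuel a seq = seq ++ r := by
  induction r with
  | nil =>
    intro a seq fuel _ _ hin
    have h0 : (a + 1) ∉ u := by simpa using hin 0 (by simp)
    cases fuel with
    | zero => simp [whileExtend]
    | succ f =>
      simp only [whileExtend]
      have hcf : u.contains (a + 1) = false := by
        rw [Bool.eq_false_iff]
        intro hcon
        exact h0 (List.contains_iff_mem.mp hcon)
      simp only [hcf, Bool.false_eq_true, if_false]
      simp
  | cons b r ih =>
    intro a seq fuel hc hfuel hin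
    obtain ⟨hb, hcr⟩ := hc
    subst hb
    cases fuel with
    | zero => simp at hfuel
    | succ f =>
      simp only [whileExtend]
      rw [if_pos]
      · rw [ih (a + 1) (seq ++ [a + 1]) f hcr (by simpa using hfuel) ?_]
        · simp
        · intro j hj
          have := hin (j + 1) (by simpa using Nat.succ_le_succ hj)
          simp only [List.length_cons] at this ⊢
          push_cast at this ⊢
          rw [show a + 1 + 1 + (j : Int) = a + 1 + ((j : Int) + 1) by ring]
          rw [this]
          omega
      · have : (a + 1) ∈ u := by
          have := hin 0 (by simp)
          simp at this; exact this
        exact List.contains_iff_mem.mpr this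

-- skipped elements leave the accumulator unchanged
theorem foldl_skip (u : List Int) (fuel : Nat) (r : List Int)
    (h : ∀ x ∈ r, (x - 1) ∈ u) :
    ∀ acc, r.foldl (fun sequences num =>
        if u.contains (num - 1) then sequences
        else sequences ++ [whileExtend u fuel num [num]]) acc = acc := by
  induction r with
  | nil => intro acc; simp
  | cons b r ih =>
    intro acc
    simp only [List.foldl_cons]
    rw [if_pos (List.contains_iff_mem.mpr (h b (by simp)))]
    exact ih (fun x hx => h x (by simp [hx])) acc

-- head of the remainder is strictly above the whole run
theorem rest_head_gt (pre r rest : List Int) (a : Int)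
    (hu : (pre ++ a :: (r ++ rest)).Pairwise (· < ·))
    (hc : Consec a r) :
    ∀ x xs, rest = x :: xs → a + r.length < x := by
  intro x xs hx
  rw [List.pairwise_append] at hu
  have hrr := List.pairwise_cons.1 hu.2.1
  have hax : a < x := hrr.1 x (by simp [hx])
  have hyx : ∀ y ∈ r, y < x := by
    intro y hy
    have h2 := hrr.2
    rw [List.pairwise_append] at h2
    exact h2.2.2 y hy x (by simp [hx])
  cases r with
  | nil => simpa using hax
  | cons b rr =>
    have hlt : (b :: rr).length - 1 < (b :: rr).length := by simp
    have hgl := consec_getElem a _ hc ((b :: rr).length - 1) hlt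
    have hcast : a + 1 + (((b :: rr).length - 1 : Nat) : Int) = a + ((b :: rr).length : Int) := by
      simp only [List.length_cons]; push_cast; omega
    rw [hcast] at hgl
    have hmem : a + ((b :: rr).length : Int) ∈ (b :: rr) := hgl ▸ List.getElem_mem hlt
    have := hyx _ hmem; omega

-- MAIN A-side lemma: the fold over a suffix starting at a run boundary produces the runs
theorem afold_eq (u : List Int) (hu : u.Pairwise (· < ·)) :
    ∀ (n : Nat) (s pre : List Int) (acc : List (List Int))
      (_ : s.length = n) (_ : u = pre ++ s)
      (_ : ∀ h t, s = h :: t → (h - 1) ∉ u),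
    s.foldl (fun sequences num =>
        if u.contains (num - 1) then sequences
        else sequences ++ [whileExtend u u.length num [num]]) acc
      = acc ++ runsOf s := by
  intro n
  induction n using Nat.strong_induction_on with
  | _ n ih =>
  intro s pre acc hls hsplit hhead
  cases s with
  | nil => simp [runsOf]
  | cons a t =>
    have hr : (takeRun a t).1 ++ (takeRun a t).2 = t := takeRun_append a t
    have hc : Consec a (takeRun a t).1 := takeRun_consec a t
    have hgap := takeRun_gap a t
    have hsplit' : u = pre ++ a :: ((takeRun a t).1 ++ (takeRun a t).2) := by
      rw [hsplit, hr]
    have hu' : (pre ++ a :: ((takeRun a t).1 ++ (takeRun a t).2)).Pairwise (· < ·) :=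
      hsplit' ▸ hu
    have hna : u.contains (a - 1) = false := by
      rw [Bool.eq_false_iff]; intro hcon
      exact hhead a t rfl (List.contains_iff_mem.mp hcon)
    have hin : ∀ j : Nat, j ≤ (takeRun a t).1.length →
        ((a + 1 + (j : Int)) ∈ u ↔ j < (takeRun a t).1.length) := by
      intro j hj
      rw [hsplit']
      exact hin_of pre (takeRun a t).1 (takeRun a t).2 a hu' hc hgap j hj
    have hflen : (takeRun a t).1.length ≤ u.length := by
      rw [hsplit']; simp [List.length_append]; omega
    have hwhile : whileExtend u u.length a [a] = [a] ++ (takeRun a t).1 :=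
      whileExtend_run u (takeRun a t).1 a [a] u.length hc hflen hin
    have hpred : ∀ x ∈ (takeRun a t).1, (x - 1) ∈ u := by
      intro x hx
      have hm := consec_pred a (takeRun a t).1 hc x hx
      rw [hsplit']
      rcases List.mem_cons.1 hm with h | h
      · simp [h]
      · simp [h]
    have hheadrest : ∀ h t', (takeRun a t).2 = h :: t' → (h - 1) ∉ u := by
      intro h t' hx
      have hgt := rest_head_gt pre (takeRun a t).1 (takeRun a t).2 a hu' hc h t' hx
      have hne := hgap h t' hx
      rw [hsplit']
      apply notin_of_between pre (takeRun a t).1 (takeRun a t).2 a _ hu' hc (by omega)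
      intro x xs hxx
      rw [hx] at hxx
      cases hxx
      omega
    simp only [List.foldl_cons, hna, Bool.false_eq_true, if_false]
    conv_lhs => rw [← hr]
    rw [List.foldl_append,
      foldl_skip u u.length (takeRun a t).1 hpred (acc ++ [whileExtend u u.length a [a]]),
      ih (takeRun a t).2.length
        (by rw [← hls]; have := takeRun_snd_length a t; simp; omega)
        (takeRun a t).2 (pre ++ a :: (takeRun a t).1)
        (acc ++ [whileExtend u u.length a [a]]) rfl (by rw [hsplit']; simp) hheadrest,
      hwhile]
    conv_rhs => rw [runsOf]
    simp

-- B side: the generic flush-accumulate characterisation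
def combi : List Int → List Int → List (List Int)
  | run, [] => [run]
  | run, v :: t =>
    if v = PySem.List.pyGetD run (-1) 0 + 1 then combi (run ++ [v]) t else run :: combi [v] t

theorem bfold_combi (t : List Int) :
    ∀ (runs : List (List Int)) (run : List Int),
    (t.foldl bStep (runs, run)).1 ++ [(t.foldl bStep (runs, run)).2] = runs ++ combi run t := by
  induction t with
  | nil => intro runs run; simp [combi]
  | cons v t ih =>
    intro runs run
    simp only [List.foldl_cons, bStep, combi]
    by_cases h : v = PySem.List.pyGetD run (-1) 0 + 1
    · rw [if_pos h, if_pos h]; exact ih runs (run ++ [v])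
    · rw [if_neg h, if_neg h]; rw [ih (runs ++ [run]) [v]]; simp

theorem combi_runsOf (t : List Int) :
    ∀ (run : List Int) (h : run ≠ []),
    combi run t = (run ++ (takeRun (run.getLast h) t).1) :: runsOf (takeRun (run.getLast h) t).2 := by
  induction t with
  | nil => intro run h; simp [combi, takeRun, runsOf]
  | cons b t ih =>
    intro run h
    have hlast : PySem.List.pyGetD run (-1) 0 = run.getLast h := PySem.List.pyGetD_neg_one run 0 h
    simp only [combi, takeRun, hlast]
    by_cases hb : b = run.getLast h + 1
    · rw [if_pos hb, if_pos hb]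
      have h2 : run ++ [b] ≠ [] := by simp
      rw [ih (run ++ [b]) h2]
      simp [hb]
    · rw [if_neg hb, if_neg hb]
      rw [ih [b] (by simp)]
      simp [runsOf, List.getLast]

-- congruence of the while loop in its membership structure
theorem whileExtend_congr (S T : List Int) (h : ∀ x, S.contains x = T.contains x) :
    ∀ (fuel : Nat) (cur : Int) (seq : List Int),
    whileExtend S fuel cur seq = whileExtend T fuel cur seq := by
  intro fuel
  induction fuel with
  | zero => intro cur seq; rfl
  | succ f ih =>
    intro cur seq
    simp only [whileExtend, h, ih]

-- ===== VERDICT (by name: the statement is the Claim_ definition above) =====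
theorem findAllSequences_spec : Claim_equal_findAllSequences := by
  unfold Claim_equal_findAllSequences
  intro nums _
  unfold Spec_findAllSequences findAllSequences findAllSequences_alt
  by_cases hn : nums = []
  · simp [hn]
  · simp only [if_neg hn]
    have hu : (PySem.List.sorted (PySem.Set.ofList nums) (fun x => x) false).Pairwise (· < ·) :=
      PySem.List.sorted_ofList_pairwise_lt nums
    have hlen : (PySem.Set.ofList nums).length
        = (PySem.List.sorted (PySem.Set.ofList nums) (fun x => x) false).length :=
      (PySem.List.length_sorted _ _ _).symm
    have hne : PySem.List.sorted (PySem.Set.ofList nums) (fun x => x) false ≠ [] := by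
      intro hnil
      cases hx : nums with
      | nil => exact hn hx
      | cons y ys =>
        have hy : y ∈ PySem.List.sorted (PySem.Set.ofList nums) (fun x => x) false :=
          (PySem.List.mem_sorted (PySem.Set.ofList nums) (fun x : Int => x) false y).mpr
            ((PySem.Set.mem_ofList nums y).mpr (by rw [hx]; simp))
        rw [hnil] at hy
        simp at hy
    cases hs : PySem.List.sorted (PySem.Set.ofList nums) (fun x => x) false with
    | nil => exact absurd hs hne
    | cons h t =>
      have hh : ∀ h' t', (h :: t : List Int) = h' :: t' → (h' - 1) ∉ (h :: t : List Int) := by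
        intro h' t' he hm
        rw [hs] at hu
        rw [he] at hu hm
        rcases List.mem_cons.1 hm with he2 | hm2
        · omega
        · have := (List.pairwise_cons.1 hu).1 _ hm2; omega
      have hA : (h :: t).foldl (fun sequences num =>
            if (h :: t).contains (num - 1) then sequences
            else sequences ++ [whileExtend (h :: t) (h :: t).length num [num]]) []
          = runsOf (h :: t) := by
        have h0 := afold_eq (h :: t) (hs ▸ hu) (h :: t).length (h :: t) [] [] rfl rfl hh
        rw [List.nil_append] at h0
        exact h0
      have hmem2 : ∀ x : Int, List.contains (PySem.Set.ofList nums) x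
          = List.contains (h :: t) x := by
        intro x
        rw [Bool.eq_iff_iff]
        simp only [List.contains_iff_mem]
        rw [← hs]
        exact (PySem.List.mem_sorted (PySem.Set.ofList nums) (fun x : Int => x) false x).symm
      have hmem1 : ∀ x : Int, PySem.Set.contains (PySem.Set.ofList nums) x
          = List.contains (h :: t) x := by
        intro x
        rw [← hmem2 x]
        rfl
      have hfun : (fun (sequences : List (List Int)) num =>
            if (PySem.Set.ofList nums).contains (num - 1) = true then sequences
            else sequences ++ [whileExtend (PySem.Set.ofList nums) (PySem.Set.ofList nums).length num [num]])
          = (fun (sequences : List (List Int)) num =>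
            if (h :: t).contains (num - 1) = true then sequences
            else sequences ++ [whileExtend (h :: t) (h :: t).length num [num]]) := by
      -- rewrite the set-membership tests to tests on the sorted list
        funext sequences num
        rw [hmem1 (num - 1), hlen, hs,
          whileExtend_congr (PySem.Set.ofList nums) (h :: t) hmem2 _ _ _]
      have hB : (PySem.List.slice (h :: t : List Int) (some 1) none).foldl bStep
            ([], [PySem.List.pyGetD (h :: t : List Int) 0 0])
          = ((t.foldl bStep ([], [h])).1, (t.foldl bStep ([], [h])).2) := by
        rw [PySem.List.slice_from_one]
        simp [PySem.List.pyGetD_zero_cons]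
      have hBr : (t.foldl bStep (([] : List (List Int)), [h])).1
            ++ [(t.foldl bStep (([] : List (List Int)), [h])).2] = runsOf (h :: t) := by
        rw [bfold_combi t [] [h]]
        rw [combi_runsOf t [h] (by simp)]
        conv_rhs => rw [runsOf]
        simp
      simp only [hfun, hA, hB]
      rw [hBr]
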